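-- pv_equiv track=rewrite | github.com/sssn-tech/Algorithm-Problem-Set | src/leetcode/2560.打家劫舍-iv.py | minCapability
-- ===== SOURCE A (Python) =====
-- from typing import List
--
-- def minCapability(nums: List[int], k: int) -> int:
--     n = len(nums)
--     def can_do(hi, kpi) -> bool:
--         # 最大偷hi, 最少偷kpi个, 不能连续偷, 能不能偷
--         # dp[i]表示截止下标i最多能偷几个
--         dp = [0] * n
--         for i in range(n):
--             steal = 1 if nums[i] <= hi else 0 # i能不能偷
--             steal += dp[i - 2] if i >= 2 else 0 # 转移之前的偷法
--             hold = dp[i - 1]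
--             dp[i] = max(steal, hold)
--         return dp[n - 1] >= kpi
--
--     l, r = min(nums), max(nums)
--     while l < r:
--         mid = (l + r) >> 1
--         if not can_do(mid, k): # hi太低了
--             l = mid + 1
--         else:
--             r = mid
--     return l
-- ===== SOURCE B (Python) =====
-- from typing import List
--
-- def minCapability(nums: List[int], k: int) -> int:
--     # Binary search over the sorted distinct values of nums (not the full
--     # integer range), with a greedy O(n) feasibility check.
--     n = len(nums)
--
--     def feasible(cap: int) -> bool:
--         count = 0
--         i = 0
--         while i < n:
--             if nums[i] <= cap:
--                 count += 1
--                 i += 2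
--             else:
--                 i += 1
--         return count >= k
--
--     vals = sorted(set(nums))
--     lo, hi = 0, len(vals) - 1
--     while lo < hi:
--         mid = (lo + hi) >> 1
--         if feasible(vals[mid]):
--             hi = mid
--         else:
--             lo = mid + 1
--     return vals[lo]
-- ===== Notes on version B (the rewrite author's own statement) =====
-- stated objective: faster
-- what changed: B binary-searches over the sorted distinct values of nums (O(n log n)) instead of the full integer range [min,max] (O(n log maxRange)), and replaces the O(n)-space dp-array feasibility check by an O(1)-space greedy scan that takes every affordable house and skips its neighbour.
import Mathlib
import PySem

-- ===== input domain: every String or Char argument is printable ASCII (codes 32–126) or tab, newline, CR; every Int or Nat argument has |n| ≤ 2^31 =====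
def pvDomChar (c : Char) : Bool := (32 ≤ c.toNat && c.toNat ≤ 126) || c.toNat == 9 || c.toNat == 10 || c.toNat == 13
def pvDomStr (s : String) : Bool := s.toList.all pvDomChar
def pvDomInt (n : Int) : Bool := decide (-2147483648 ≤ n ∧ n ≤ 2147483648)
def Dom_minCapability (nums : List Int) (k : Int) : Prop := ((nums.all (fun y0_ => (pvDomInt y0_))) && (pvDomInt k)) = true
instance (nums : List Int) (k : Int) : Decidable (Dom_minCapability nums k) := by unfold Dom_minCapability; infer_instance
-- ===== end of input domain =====

-- B replaces A's binary search over the whole integer range [min(nums),max(nums)] by a binary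
-- search over the sorted distinct values of nums, with a greedy O(1)-space feasibility scan
-- instead of A's dp array (objective: faster; same return value on every non-empty nums).

-- termination fact for the binary-search midpoint, cited by both loop ports
theorem pvMid_bounds (l r : Int) (h : l < r) :
    l ≤ (l + r) >>> (1:Nat) ∧ (l + r) >>> (1:Nat) < r := by
  rw [Int.shiftRight_eq_div_pow]; constructor <;> omega

-- ===== PORT A =====
-- can_do(hi, kpi): dp array over nums; all list indices are in range for nums ≠ [] (Pre_),
-- so Python's dp[i-1] / dp[i-2] / dp[n-1] / nums[i] are ported with the total pyGetD/pySetD.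
def pvCanDo (nums : List Int) (n hi kpi : Int) : Bool :=
  let dp : List Int := List.replicate n.toNat 0
  let dp := (PySem.List.pyRange 0 n 1).foldl (fun dp i =>
      let steal : Int := (if PySem.List.pyGetD nums i 0 ≤ hi then 1 else 0)
            + (if i ≥ 2 then PySem.List.pyGetD dp (i - 2) 0 else 0)
      let hold := PySem.List.pyGetD dp (i - 1) 0
      PySem.List.pySetD dp i (max steal hold)) dp
  decide (PySem.List.pyGetD dp (n - 1) 0 ≥ kpi)

-- the 'while l < r' binary-search loop of A
def pvLoopA (nums : List Int) (n k l r : Int) : Int :=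
  if h : l < r then
    let mid := (l + r) >>> (1:Nat)
    if !(pvCanDo nums n mid k) then pvLoopA nums n k (mid + 1) r
    else pvLoopA nums n k l mid
  else l
termination_by (r - l).toNat
decreasing_by
  · have := pvMid_bounds l r h; omega
  · have := pvMid_bounds l r h; omega

def minCapability (nums : List Int) (k : Int) : Int :=
  let n : Int := nums.length
  -- min(nums) / max(nums) raise ValueError on nums = [] (excluded by Pre_): total .getD form
  let l := (PySem.List.min? nums (fun x => x)).getD 0
  let r := (PySem.List.max? nums (fun x => x)).getD 0
  pvLoopA nums n k l r

-- ===== PORT B =====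
-- greedy scan 'while i < n: if nums[i] <= cap: count += 1; i += 2 else: i += 1'
-- as the obvious structural recursion over the remaining list
def pvGreedy (nums : List Int) (cap : Int) : Int :=
  match nums with
  | [] => 0
  | x :: rest => if x ≤ cap then 1 + pvGreedy (rest.drop 1) cap else pvGreedy rest cap
termination_by nums.length
decreasing_by all_goals (simp only [List.length_drop, List.length_cons]; omega)

def pvFeasible (nums : List Int) (k cap : Int) : Bool :=
  decide (pvGreedy nums cap ≥ k)

-- the 'while lo < hi' binary-search loop of B, over indices into vals
def pvLoopB (nums : List Int) (k : Int) (vals : List Int) (lo hi : Int) : Int :=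
  if h : lo < hi then
    let mid := (lo + hi) >>> (1:Nat)
    if pvFeasible nums k (PySem.List.pyGetD vals mid 0) then pvLoopB nums k vals lo mid
    else pvLoopB nums k vals (mid + 1) hi
  else lo
termination_by (hi - lo).toNat
decreasing_by
  · have := pvMid_bounds lo hi h; omega
  · have := pvMid_bounds lo hi h; omega

def minCapability_alt (nums : List Int) (k : Int) : Int :=
  let vals := PySem.List.sorted (PySem.Set.ofList nums) (fun x => x) false
  let idx := pvLoopB nums k vals 0 ((vals.length : Int) - 1)
  -- vals[idx]: idx is in range for nums ≠ [] (Pre_); raises on nums = [] like A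
  PySem.List.pyGetD vals idx 0

-- ===== PRECONDITION & SPEC =====
-- Pre_ excludes only nums = [], where A raises ValueError (min of an empty list).
def Pre_minCapability (nums : List Int) (k : Int) : Prop := nums ≠ []
instance (nums : List Int) (k : Int) : Decidable (Pre_minCapability nums k) := by
  unfold Pre_minCapability; infer_instance

def pvWitness_minCapability : List Int × Int := ([2, 3, 5, 9], 2)

def Spec_minCapability (nums : List Int) (k : Int) (out : Int) : Prop := out = minCapability_alt nums k
instance (nums : List Int) (k : Int) (out : Int) : Decidable (Spec_minCapability nums k out) := by
  unfold Spec_minCapability; infer_instance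

-- ===== CLAIM (what is proved, stated in full; the proofs are below) =====
def Claim_equal_minCapability : Prop := ∀ (nums : List Int) (k : Int), Dom_minCapability nums k → Pre_minCapability nums k → Spec_minCapability nums k (minCapability nums k)

-- ===== LEMMAS AND PROOFS =====

-- the dp transition of A's can_do, as a function of the pair (dp[i-2], dp[i-1])
def pvStep (p : Int × Int) (b : Bool) : Int × Int :=
  (p.2, max ((if b then 1 else 0) + p.1) p.2)

-- greedy count over the availability booleans
def pvG : List Bool → Int
  | [] => 0
  | b :: r => if b then 1 + pvG (r.drop 1) else pvG r
termination_by bs => bs.length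
decreasing_by all_goals (simp only [List.length_drop, List.length_cons]; omega)

def pvBools (nums : List Int) (cap : Int) : List Bool :=
  nums.map (fun x => decide (x ≤ cap))

-- generic binary-search loop (proof-side), the common shape of pvLoopA / pvLoopB
def pvBisect (P : Int → Bool) (l r : Int) : Int :=
  if h : l < r then
    let mid := (l + r) >>> (1:Nat)
    if P mid then pvBisect P l mid else pvBisect P (mid + 1) r
  else l
termination_by (r - l).toNat
decreasing_by
  · have := pvMid_bounds l r h; omega
  · have := pvMid_bounds l r h; omega

theorem pvLoopA_eq_bisect (nums : List Int) (n k l r : Int) :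
    pvLoopA nums n k l r = pvBisect (fun m => pvCanDo nums n m k) l r := by
  fun_induction pvLoopA nums n k l r with
  | case1 l r h mid hcd ih =>
      rw [pvBisect, dif_pos h]
      simp only at hcd ⊢
      rw [if_neg (by simpa using hcd)]
      exact ih
  | case2 l r h mid hcd ih =>
      rw [pvBisect, dif_pos h]
      simp only at hcd ⊢
      rw [if_pos (by simpa using hcd)]
      exact ih
  | case3 l r h => rw [pvBisect, dif_neg h]

theorem pvLoopB_eq_bisect (nums : List Int) (k : Int) (vals : List Int) (lo hi : Int) :
    pvLoopB nums k vals lo hi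
      = pvBisect (fun i => pvFeasible nums k (PySem.List.pyGetD vals i 0)) lo hi := by
  fun_induction pvLoopB nums k vals lo hi with
  | case1 lo hi h mid hf ih =>
      rw [pvBisect, dif_pos h]
      simp only at hf ⊢
      rw [if_pos hf]
      exact ih
  | case2 lo hi h mid hf ih =>
      rw [pvBisect, dif_pos h]
      simp only at hf ⊢
      rw [if_neg (by simpa using hf)]
      exact ih
  | case3 lo hi h => rw [pvBisect, dif_neg h]

-- binary search returns r when P fails everywhere on [l, r)
theorem pvBisect_none (P : Int → Bool) (l r : Int) (hlr : l ≤ r)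
    (hnone : ∀ x, l ≤ x → x < r → P x = false) : pvBisect P l r = r := by
  fun_induction pvBisect P l r with
  | case1 l r h mid hP ih =>
      exact absurd hP (by simp [hnone mid (pvMid_bounds l r h).1 (pvMid_bounds l r h).2])
  | case2 l r h mid hP ih =>
      exact ih (by have := pvMid_bounds l r h; omega)
        (fun x hx hx' => hnone x (by have := pvMid_bounds l r h; omega) hx')
  | case3 l r h => omega

-- binary search finds the least l ≤ x ≤ r with P x, when P is monotone on [l,r] and P r holds
theorem pvBisect_found (P : Int → Bool) (l r : Int) (hlr : l ≤ r)
    (hmono : ∀ x y, l ≤ x → x ≤ y → y ≤ r → P x → P y) (hr : P r = true) :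
    l ≤ pvBisect P l r ∧ pvBisect P l r ≤ r ∧ P (pvBisect P l r) = true ∧
      ∀ x, l ≤ x → x < pvBisect P l r → P x = false := by
  fun_induction pvBisect P l r with
  | case1 l r h mid hP ih =>
      have hb := pvMid_bounds l r h
      obtain ⟨h1, h2, h3, h4⟩ := ih (by omega)
        (fun x y hx hxy hy hPx => hmono x y hx hxy (by omega) hPx) hP
      exact ⟨h1, by omega, h3, h4⟩
  | case2 l r h mid hP ih =>
      have hb := pvMid_bounds l r h
      obtain ⟨h1, h2, h3, h4⟩ := ih (by omega)
        (fun x y hx hxy hy hPx => hmono x y (by omega) hxy hy hPx) hr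
      refine ⟨by omega, h2, h3, fun x hx hx' => ?_⟩
      by_cases hxm : x ≤ mid
      · cases hPx : P x
        · rfl
        · exact absurd (hmono x mid hx hxm (by omega) hPx) (by simp [hP])
      · exact h4 x (by omega) hx'
  | case3 l r h =>
      have heq : l = r := by omega
      subst heq
      exact ⟨le_refl l, le_refl l, hr, by omega⟩

-- the pair dp from a balanced state computes the greedy count
theorem pvFoldl_step_eq_G (bs : List Bool) (p : Int) :
    (List.foldl pvStep (p, p) bs).2 = p + pvG bs := by
  fun_induction pvG bs generalizing p with
  | case1 => simp
  | case2 r ih =>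
      have hstep : pvStep (p, p) true = (p, p + 1) := by simp [pvStep]; omega
      cases r with
      | nil => simp [pvStep, pvG]; omega
      | cons c r2 =>
          have h2 : pvStep (p, p + 1) c = (p + 1, p + 1) := by
            cases c <;> simp [pvStep] <;> omega
          simp only [List.foldl_cons, hstep, h2, List.drop_succ_cons, List.drop_zero] at *
          rw [ih (p+1)]
          omega
  | case3 b r hb ih =>
      have hb' : b = false := by simpa using hb
      subst hb'
      have hstep : pvStep (p, p) false = (p, p) := by simp [pvStep]
      simp only [List.foldl_cons, hstep]
      exact ih p

-- monotonicity of the pair dp under pointwise implication of the booleans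
theorem pvFoldl_step_mono (bs₁ bs₂ : List Bool)
    (h : List.Forall₂ (fun a b => a = true → b = true) bs₁ bs₂) :
    ∀ p q : Int × Int, p.1 ≤ q.1 → p.2 ≤ q.2 →
      (List.foldl pvStep p bs₁).1 ≤ (List.foldl pvStep q bs₂).1 ∧
      (List.foldl pvStep p bs₁).2 ≤ (List.foldl pvStep q bs₂).2 := by
  induction h with
  | nil => exact fun p q h1 h2 => ⟨h1, h2⟩
  | cons hab htl ih =>
      intro p q h1 h2
      refine ih (pvStep p _) (pvStep q _) (by simpa [pvStep] using h2) ?_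
      rename_i a b _ _
      cases a <;> cases b <;> simp_all [pvStep] <;> omega

-- B's greedy scan computes pvG over the availability booleans
theorem pvGreedy_eq (nums : List Int) (cap : Int) :
    pvGreedy nums cap = pvG (pvBools nums cap) := by
  fun_induction pvGreedy nums cap with
  | case1 => simp [pvG, pvBools]
  | case2 x rest hx ih =>
      rw [pvBools, List.map_cons, pvG]
      simp only [hx, decide_true, if_true, ← List.map_drop]
      rw [ih]; rfl
  | case3 x rest hx ih =>
      rw [pvBools, List.map_cons, pvG]
      simp only [decide_eq_true_eq, hx, if_false]
      exact ih

theorem pvG_eq_foldl (bs : List Bool) : pvG bs = (List.foldl pvStep (0, 0) bs).2 := by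
  have := pvFoldl_step_eq_G bs 0; omega

-- feasibility is monotone in the cap
theorem pvFeasible_mono (nums : List Int) (k c₁ c₂ : Int) (h : c₁ ≤ c₂)
    (hf : pvFeasible nums k c₁ = true) : pvFeasible nums k c₂ = true := by
  simp only [pvFeasible, decide_eq_true_eq] at *
  rw [pvGreedy_eq, pvG_eq_foldl] at *
  have hmono := pvFoldl_step_mono (pvBools nums c₁) (pvBools nums c₂)
    (by
      simp only [pvBools, List.forall₂_map_left_iff, List.forall₂_map_right_iff]
      exact List.forall₂_same.mpr (fun x _ hx => by simp at hx ⊢; omega))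
    (0,0) (0,0) le_rfl le_rfl
  omega

-- feasibility only depends on which elements are ≤ cap
theorem pvFeasible_congr (nums : List Int) (k c₁ c₂ : Int)
    (h : ∀ x ∈ nums, x ≤ c₁ ↔ x ≤ c₂) : pvFeasible nums k c₁ = pvFeasible nums k c₂ := by
  simp only [pvFeasible]
  rw [pvGreedy_eq, pvGreedy_eq]
  have : pvBools nums c₁ = pvBools nums c₂ := by
    simp only [pvBools]
    exact List.map_congr_left (fun x hx => by simpa using h x hx)
  rw [this]

-- A's can_do body, named for the loop invariant
def pvBody (nums : List Int) (hi : Int) (dp : List Int) (i : Int) : List Int :=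
  let steal : Int := (if PySem.List.pyGetD nums i 0 ≤ hi then 1 else 0)
        + (if i ≥ 2 then PySem.List.pyGetD dp (i - 2) 0 else 0)
  let hold := PySem.List.pyGetD dp (i - 1) 0
  PySem.List.pySetD dp i (max steal hold)

theorem pvCanDo_unfold (nums : List Int) (n hi kpi : Int) :
    pvCanDo nums n hi kpi = decide (PySem.List.pyGetD
      ((PySem.List.pyRange 0 n 1).foldl (pvBody nums hi) (List.replicate n.toNat 0)) (n - 1) 0 ≥ kpi) := rfl

-- pair-dp state after the first j houses
def pvSt (nums : List Int) (hi : Int) (j : Nat) : Int × Int :=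
  List.foldl pvStep ((0:Int), (0:Int)) ((pvBools nums hi).take j)

theorem pvSt_one_fst (nums : List Int) (hi : Int) : (pvSt nums hi 1).1 = 0 := by
  rcases hb : pvBools nums hi with _ | ⟨b, rest⟩ <;> simp [pvSt, hb, pvStep]

-- loop invariant of A's dp array: after j iterations the cells j-1 / j-2 hold the
-- pair-dp state of the first j houses, and the cells from j on are still 0
theorem pvCanDo_inv (nums : List Int) (hi : Int) (hne : nums ≠ []) (j : Nat)
    (hj : j ≤ nums.length) :
    letI dp := (PySem.List.pyRange 0 (j:Int) 1).foldl (pvBody nums hi) (List.replicate nums.length 0)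
    dp.length = nums.length ∧ (∀ t : Nat, j ≤ t → t < nums.length → dp.getD t 0 = 0) ∧
      (∀ t : Nat, t + 1 = j → dp.getD t 0 = (pvSt nums hi j).2) ∧
      (∀ t : Nat, t + 2 = j → dp.getD t 0 = (pvSt nums hi j).1) := by
  induction j with
  | zero =>
      simp only [Nat.cast_zero, PySem.List.pyRange_one_eq_nil le_rfl, List.foldl_nil]
      refine ⟨List.length_replicate, fun t _ ht => ?_, by omega, by omega⟩
      rw [List.getD_eq_getElem (List.replicate nums.length (0:Int)) 0 (by simpa using ht)]
      simp
  | succ j ih =>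
      obtain ⟨hlen, hzero, h1, h2⟩ := ih (by omega)
      have hjlt : j < nums.length := by omega
      have hcast : ((j+1 : Nat) : Int) = (j : Int) + 1 := by push_cast; ring
      rw [hcast, PySem.List.pyRange_one_succ_right (by positivity), List.foldl_append,
        List.foldl_cons, List.foldl_nil]
      set dp := (PySem.List.pyRange 0 (j:Int) 1).foldl (pvBody nums hi)
        (List.replicate nums.length 0) with hdp
      have hdpne : dp ≠ [] := by
        intro hnil; rw [hnil] at hlen; simp at hlen
        exact hne (List.eq_nil_of_length_eq_zero hlen.symm)
      have hblen : (pvBools nums hi).length = nums.length := by simp [pvBools]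
      have hbj : (pvBools nums hi)[j]'(by omega) = decide (nums[j]'hjlt ≤ hi) := by simp [pvBools]
      have hstsucc : pvSt nums hi (j+1) = pvStep (pvSt nums hi j) ((pvBools nums hi)[j]'(by omega)) := by
        rw [pvSt, List.take_succ_eq_append_getElem (by omega), List.foldl_append,
          List.foldl_cons, List.foldl_nil]; rfl
      have hnums : PySem.List.pyGetD nums (j:Int) 0 = nums[j]'hjlt := by
        rw [PySem.List.pyGetD_natCast, List.getD_eq_getElem nums 0 (by omega)]
      have hhold : PySem.List.pyGetD dp ((j:Int) - 1) 0 = (pvSt nums hi j).2 := by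
        rcases Nat.eq_zero_or_pos j with hj0 | hj0
        · subst hj0
          norm_num
          rw [PySem.List.pyGetD_neg_one (h := hdpne)]
          rw [List.getLast_eq_getElem, ← List.getD_eq_getElem dp 0 (by omega)]
          rw [hzero (dp.length - 1) (by omega) (by omega)]
          simp [pvSt]
        · have hc : (j:Int) - 1 = ((j - 1 : Nat) : Int) := by omega
          rw [hc, PySem.List.pyGetD_natCast]
          exact h1 (j-1) (by omega)
      have hsteal : ((if PySem.List.pyGetD nums (j:Int) 0 ≤ hi then (1:Int) else 0)
            + (if (j:Int) ≥ 2 then PySem.List.pyGetD dp ((j:Int) - 2) 0 else 0))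
          = (if (pvBools nums hi)[j]'(by omega) then (1:Int) else 0) + (pvSt nums hi j).1 := by
        rw [hnums, hbj]
        congr 1
        · simp
        · rcases Nat.lt_or_ge j 2 with hj2 | hj2
          · have hlt : ¬ ((j:Int) ≥ 2) := by omega
            rw [if_neg hlt]
            match j, hj2 with
            | 0, _ => simp [pvSt]
            | 1, _ => exact (pvSt_one_fst nums hi).symm
          · have hc : ((j:Int) - 2) = ((j - 2 : Nat) : Int) := by omega
            rw [if_pos (by omega), hc, PySem.List.pyGetD_natCast]
            exact h2 (j-2) (by omega)
      have hnew : pvBody nums hi dp (j:Int) = dp.set j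
          (max ((if (pvBools nums hi)[j]'(by omega) then (1:Int) else 0) + (pvSt nums hi j).1)
            (pvSt nums hi j).2) := by
        unfold pvBody
        rw [hsteal, hhold, PySem.List.pySetD_natCast]
      rw [hnew]
      have hv : max ((if (pvBools nums hi)[j]'(by omega) then (1:Int) else 0) + (pvSt nums hi j).1)
          (pvSt nums hi j).2 = (pvSt nums hi (j+1)).2 := by
        rw [hstsucc]; rfl
      refine ⟨by simpa using hlen, ?_, ?_, ?_⟩
      · intro t ht htn
        rw [List.getD, List.getElem?_set]
        have : ¬ (j = t) := by omega
        simp only [this, if_false]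
        exact hzero t (by omega) htn
      · intro t ht
        have htj : t = j := by omega
        subst htj
        rw [List.getD, List.getElem?_set]
        simp only [if_pos (by omega : t < dp.length)]
        simpa using hv
      · intro t ht
        have htj : t + 1 = j := by omega
        rw [List.getD, List.getElem?_set]
        have : ¬ (j = t) := by omega
        simp only [this, if_false]
        rw [← List.getD]
        rw [h1 t htj, hstsucc]
        rfl

-- A's can_do computes the pair dp over the availability booleans
theorem pvCanDo_eq (nums : List Int) (hi kpi : Int) (hne : nums ≠ []) :
    pvCanDo nums (nums.length : Int) hi kpi
      = decide ((List.foldl pvStep (0, 0) (pvBools nums hi)).2 ≥ kpi) := by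
  have hlen1 : 1 ≤ nums.length := List.length_pos_iff.mpr hne
  obtain ⟨hlen, hzero, h1, h2⟩ := pvCanDo_inv nums hi hne nums.length le_rfl
  rw [pvCanDo_unfold]
  set dp := (PySem.List.pyRange 0 (nums.length : Int) 1).foldl (pvBody nums hi)
    (List.replicate ((nums.length : Int)).toNat 0) with hdp
  have hdp' : dp = (PySem.List.pyRange 0 (nums.length : Int) 1).foldl (pvBody nums hi)
      (List.replicate nums.length 0) := by rw [hdp]; norm_num
  have hc : (nums.length : Int) - 1 = ((nums.length - 1 : Nat) : Int) := by omega
  rw [hc, PySem.List.pyGetD_natCast, hdp']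
  rw [h1 (nums.length - 1) (by omega)]
  have : (pvBools nums hi).take nums.length = pvBools nums hi := by
    apply List.take_of_length_le; simp [pvBools]
  rw [pvSt, this]

-- A's can_do agrees with B's feasibility test
theorem pvCanDo_eq_feasible (nums : List Int) (hi k : Int) (hne : nums ≠ []) :
    pvCanDo nums (nums.length : Int) hi k = pvFeasible nums k hi := by
  rw [pvCanDo_eq nums hi k hne, pvFeasible, pvGreedy_eq, pvG_eq_foldl]

-- ===== VERDICT (by name: the statement is the Claim_ definition above) =====
theorem minCapability_spec : Claim_equal_minCapability := by
  intro nums k _ hpre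
  unfold Pre_minCapability at hpre
  unfold Spec_minCapability
  obtain ⟨mn, hmn⟩ : ∃ mn, PySem.List.min? nums (fun x => x) = some mn := by
    cases h : PySem.List.min? nums (fun x => x) with
    | none => exact absurd ((PySem.List.min?_eq_none_iff nums _).mp h) hpre
    | some v => exact ⟨v, rfl⟩
  obtain ⟨mx, hmx⟩ : ∃ mx, PySem.List.max? nums (fun x => x) = some mx := by
    cases h : PySem.List.max? nums (fun x => x) with
    | none => exact absurd ((PySem.List.max?_eq_none_iff nums _).mp h) hpre
    | some v => exact ⟨v, rfl⟩
  have hmnmem : mn ∈ nums := PySem.List.min?_mem hmn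
  have hmxmem : mx ∈ nums := PySem.List.max?_mem hmx
  have hmin : ∀ y ∈ nums, mn ≤ y := fun y hy => by simpa using PySem.List.min?_isMin hmn y hy
  have hmax : ∀ y ∈ nums, y ≤ mx := fun y hy => by simpa using PySem.List.max?_isMax hmx y hy
  set vals := PySem.List.sorted (PySem.Set.ofList nums) (fun x => x) false with hvals
  have hvmem : ∀ v, v ∈ vals ↔ v ∈ nums := fun v => by
    rw [hvals, PySem.List.mem_sorted, PySem.Set.mem_ofList]
  have hpair : vals.Pairwise (· < ·) := by
    rw [hvals]; exact PySem.List.sorted_ofList_pairwise_lt nums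
  have hvne : vals ≠ [] := by
    intro hnil
    exact hpre (List.eq_nil_iff_forall_not_mem.mpr (fun x hx =>
      (List.eq_nil_iff_forall_not_mem.mp hnil x) ((hvmem x).mpr hx)))
  have hm1 : 1 ≤ vals.length := List.length_pos_iff.mpr hvne
  have hmono_get : ∀ (p q : Nat) (hpq : p ≤ q) (hq : q < vals.length),
      vals[p]'(Nat.lt_of_le_of_lt hpq hq) ≤ vals[q]'hq := by
    intro p q hpq hq
    rcases Nat.lt_or_ge p q with h | h
    · exact le_of_lt ((List.pairwise_iff_getElem.mp hpair) p q (by omega) hq h)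
    · have : p = q := by omega
      subst this; exact le_rfl
  have hlast : vals[vals.length - 1]'(by omega) = mx := by
    have hmem : vals[vals.length - 1]'(by omega) ∈ nums := (hvmem _).mp (List.getElem_mem _)
    refine le_antisymm (hmax _ hmem) ?_
    obtain ⟨i, hi, hieq⟩ := List.mem_iff_getElem.mp ((hvmem mx).mpr hmxmem)
    exact hieq ▸ hmono_get i (vals.length - 1) (by omega) (by omega)
  have hgetv : ∀ (i : Int) (h1 : 0 ≤ i) (h2 : i < (vals.length : Int)),
      PySem.List.pyGetD vals i 0 = vals[i.toNat]'(by omega) := by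
    intro i h1 h2
    exact PySem.List.pyGetD_eq_getElem vals 0 h1 h2
  have hA : minCapability nums k = pvBisect (fun c => pvFeasible nums k c) mn mx := by
    show pvLoopA nums (nums.length : Int) k ((PySem.List.min? nums (fun x => x)).getD 0)
      ((PySem.List.max? nums (fun x => x)).getD 0) = _
    rw [hmn, hmx]
    simp only [Option.getD_some]
    rw [pvLoopA_eq_bisect]
    congr 1
    funext c
    exact pvCanDo_eq_feasible nums c k hpre
  have hB : minCapability_alt nums k = PySem.List.pyGetD vals
      (pvBisect (fun i => pvFeasible nums k (PySem.List.pyGetD vals i 0)) 0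
        ((vals.length : Int) - 1)) 0 := by
    show PySem.List.pyGetD vals (pvLoopB nums k vals 0 ((vals.length : Int) - 1)) 0 = _
    rw [pvLoopB_eq_bisect]
  set P := fun c => pvFeasible nums k c with hP
  set Q := fun i : Int => pvFeasible nums k (PySem.List.pyGetD vals i 0) with hQ
  have hmnmx : mn ≤ mx := hmin mx hmxmem
  have hQmono : ∀ x y, 0 ≤ x → x ≤ y → y ≤ (vals.length : Int) - 1 → Q x = true → Q y = true := by
    intro x y hx hxy hy hQx
    simp only [hQ] at hQx ⊢
    rw [hgetv x (by omega) (by omega)] at hQx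
    rw [hgetv y (by omega) (by omega)]
    exact pvFeasible_mono nums k _ _ (hmono_get x.toNat y.toNat (by omega) (by omega)) hQx
  by_cases hPmx : P mx = true
  · obtain ⟨ha1, ha2, ha3, ha4⟩ := pvBisect_found P mn mx hmnmx
      (fun x y _ hxy _ hPx => pvFeasible_mono nums k x y hxy hPx) hPmx
    set a := pvBisect P mn mx with haa
    have hamem : a ∈ nums := by
      by_cases haeq : a = mn
      · rw [haeq]; exact hmnmem
      · by_contra hnot
        have hcg : P (a - 1) = P a := by
          refine pvFeasible_congr nums k (a - 1) a (fun x hx => ?_)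
          have hxa : x ≠ a := fun h => hnot (h ▸ hx)
          omega
        have hfa := ha4 (a - 1) (by omega) (by omega)
        rw [hcg, ha3] at hfa
        cases hfa
    obtain ⟨j, hj, hja⟩ := List.mem_iff_getElem.mp ((hvmem a).mpr hamem)
    have hQr : Q ((vals.length : Int) - 1) = true := by
      simp only [hQ]
      rw [hgetv ((vals.length : Int) - 1) (by omega) (by omega)]
      have hcast : (((vals.length : Int) - 1)).toNat = vals.length - 1 := by omega
      rw [getElem_congr_idx hcast, hlast]
      exact hPmx
    obtain ⟨hb1, hb2, hb3, hb4⟩ := pvBisect_found Q 0 ((vals.length : Int) - 1) (by omega) hQmono hQr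
    set idx := pvBisect Q 0 ((vals.length : Int) - 1) with hidxdef
    have hQj : Q (j : Int) = true := by
      simp only [hQ]
      rw [hgetv (j : Int) (by positivity) (by exact_mod_cast hj)]
      rw [getElem_congr_idx (Int.toNat_natCast j), hja]
      exact ha3
    have hidxj : idx ≤ (j : Int) := by
      by_contra h
      have := hb4 (j : Int) (by positivity) (by omega)
      rw [hQj] at this
      cases this
    have hvidx_le : vals[idx.toNat]'(by omega) ≤ a :=
      hja ▸ hmono_get idx.toNat j (by omega) hj
    have hvidx_P : P (vals[idx.toNat]'(by omega)) = true := by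
      have h3 := hb3
      simp only [hQ] at h3
      rw [hgetv idx hb1 (by omega)] at h3
      exact h3
    have hvidx_mem : vals[idx.toNat]'(by omega) ∈ nums := (hvmem _).mp (List.getElem_mem _)
    have hvidx_ge : a ≤ vals[idx.toNat]'(by omega) := by
      by_contra h
      have hf := ha4 (vals[idx.toNat]'(by omega)) (hmin _ hvidx_mem) (by omega)
      rw [hvidx_P] at hf
      cases hf
    rw [hA, hB, hgetv idx hb1 (by omega)]
    exact le_antisymm hvidx_ge hvidx_le
  · have hPmx' : P mx = false := by simpa using hPmx
    have hnoneP : ∀ x, x ≤ mx → P x = false := by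
      intro x hx
      cases hPx : P x
      · rfl
      · exact absurd (pvFeasible_mono nums k x mx hx hPx) (by simp only [hP] at hPmx' ⊢; simp [hPmx'])
    have hAval : pvBisect P mn mx = mx :=
      pvBisect_none P mn mx hmnmx (fun x _ hx => hnoneP x (by omega))
    have hBval : pvBisect Q 0 ((vals.length : Int) - 1) = (vals.length : Int) - 1 := by
      refine pvBisect_none Q 0 ((vals.length : Int) - 1) (by omega) (fun i h0 hi => ?_)
      simp only [hQ]
      rw [hgetv i h0 (by omega)]
      exact hnoneP _ (hmax _ ((hvmem _).mp (List.getElem_mem _)))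
    rw [hA, hB, hAval, hBval, hgetv ((vals.length : Int) - 1) (by omega) (by omega)]
    have hcast : (((vals.length : Int) - 1)).toNat = vals.length - 1 := by omega
    rw [getElem_congr_idx hcast, hlast]
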